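-- pv_equiv track=rewrite | github.com/Tasyaak/TPPOProject | processing_cpp/compile_cpp.py | strip_cpp_comments
-- ===== SOURCE A (Python) =====
-- def strip_cpp_comments(code : str) -> str:
--     code = code.strip()
--     result = []
--     i = 0
--     n = len(code)
--     state = "code"
--
--     while i < n:
--         ch = code[i]
--
--         if state == "code":
--             # начало строкового литерала
--             if ch == '"':
--                 state = "string"
--                 result.append(ch)
--                 i += 1
--                 continue
--             # начало символьного литерала
--             if ch == "'":
--                 state = "char"
--                 result.append(ch)
--                 i += 1
--                 continue
--             # потенциальное начало комментария
--             if ch == "/" and i + 1 < n: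
--                 next_ch = code[i + 1]
--                 # // однострочный комментарий
--                 if next_ch == "/":
--                     state = "line_comment"
--                     i += 2
--                     continue
--                 # /* ... */ многострочный комментарий
--                 if next_ch == "*":
--                     state = "block_comment"
--                     i += 2
--                     continue
--             # обычный код — просто копируем символ
--             result.append(ch)
--             i += 1
--         elif state == "string":
--             result.append(ch)
--             # экранированный символ внутри строки
--             if ch == "\\" and i + 1 < n:
--                 result.append(code[i + 1])
--                 i += 2
--                 continue
--             # конец строкового литерала
--             if ch == '"':
--                 state = "code"
--             i += 1
--         elif state == "char":
--             result.append(ch)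
--             # экранированный символ внутри символьного литерала
--             if ch == "\\" and i + 1 < n:
--                 result.append(code[i + 1])
--                 i += 2
--                 continue
--             # конец символьного литерала
--             if ch == "'":
--                 state = "code"
--             i += 1
--         elif state == "line_comment":
--             # пропускаем до конца строки
--             if ch == "\n":
--                 # перевод строки сохраняем, чтобы структура кода не ломалась
--                 result.append(ch)
--                 state = "code"
--             i += 1
--         elif state == "block_comment":
--             # ищем закрывающую последовательность */
--             if ch == "*" and i + 1 < n and code[i + 1] == "/":
--                 state = "code"
--                 i += 2
--             else:
--                 i += 1
--     return "".join(result).strip()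
-- ===== SOURCE B (Python) =====
-- import re
--
-- _TOKEN = re.compile(
--     r'"(?:\\.|[^"\\])*"?'      # string literal (optionally unterminated)
--     r"|'(?:\\.|[^'\\])*'?"     # char literal (optionally unterminated)
--     r'|//[^\n]*'               # line comment (newline kept)
--     r'|/\*(?:.*?\*/|.*)',      # block comment, possibly running to EOF
--     re.S,
-- )
--
-- def strip_cpp_comments(code: str) -> str:
--     out = _TOKEN.sub(lambda m: m.group(0) if m.group(0)[0] in '"\'' else '', code.strip())
--     return out.strip()
-- ===== Notes on version B (the rewrite author's own statement) =====
-- stated objective: faster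
-- what changed: Replaced the explicit index/state-variable while loop with a single compiled regex (ordered alternation for string/char literals and line/block comments) applied via re.sub with a keep-or-drop callback.
import Mathlib
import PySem

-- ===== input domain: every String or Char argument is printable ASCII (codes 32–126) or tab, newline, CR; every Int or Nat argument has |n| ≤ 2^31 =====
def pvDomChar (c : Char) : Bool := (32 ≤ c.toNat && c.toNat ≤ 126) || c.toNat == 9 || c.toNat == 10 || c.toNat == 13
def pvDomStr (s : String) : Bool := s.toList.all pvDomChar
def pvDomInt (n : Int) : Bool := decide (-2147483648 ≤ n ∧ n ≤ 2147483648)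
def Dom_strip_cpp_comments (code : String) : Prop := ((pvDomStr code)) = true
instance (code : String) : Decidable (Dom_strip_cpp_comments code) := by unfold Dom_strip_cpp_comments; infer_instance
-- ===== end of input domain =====

-- B replaces A's index/state-variable while loop with a token-at-a-time regex substitution
-- (ordered alternation, keep-or-drop callback); same return value, measured faster (C regex engine).

-- ===== PORT A =====
-- A's state variable: "code" / "string" / "char" / "line_comment" / "block_comment"
inductive PvStateA : Type
  | code | str | chr | line | block
deriving DecidableEq, Repr

-- the while loop of A: i advances by 1 or 2, so it is recursion on the remaining characters;
-- 'i + 1 < n' is 'the tail is nonempty', hence the one-element patterns. Branch order kept.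
def pvRunA : PvStateA → List Char → List Char
  | _, [] => []
  | .code, [c] =>
    if c = '"' then c :: pvRunA .str []
    else if c = '\'' then c :: pvRunA .chr []
    else c :: pvRunA .code []          -- for '/', 'i + 1 < n' fails: plain copy
  | .code, c :: c2 :: rest =>
    if c = '"' then c :: pvRunA .str (c2 :: rest)
    else if c = '\'' then c :: pvRunA .chr (c2 :: rest)
    else if c = '/' ∧ c2 = '/' then pvRunA .line rest
    else if c = '/' ∧ c2 = '*' then pvRunA .block rest
    else c :: pvRunA .code (c2 :: rest)
  | .str, [c] =>
    if c = '\\' then c :: pvRunA .str []          -- escape check first, but no next char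
    else if c = '"' then c :: pvRunA .code []
    else c :: pvRunA .str []
  | .str, c :: c2 :: rest =>
    if c = '\\' then c :: c2 :: pvRunA .str rest
    else if c = '"' then c :: pvRunA .code (c2 :: rest)
    else c :: pvRunA .str (c2 :: rest)
  | .chr, [c] =>
    if c = '\\' then c :: pvRunA .chr []
    else if c = '\'' then c :: pvRunA .code []
    else c :: pvRunA .chr []
  | .chr, c :: c2 :: rest =>
    if c = '\\' then c :: c2 :: pvRunA .chr rest
    else if c = '\'' then c :: pvRunA .code (c2 :: rest)
    else c :: pvRunA .chr (c2 :: rest)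
  | .line, c :: rest =>
    if c = '\n' then c :: pvRunA .code rest else pvRunA .line rest
  | .block, [c] => pvRunA .block []              -- '*' without a next char: just advance
  | .block, c :: c2 :: rest =>
    if c = '*' ∧ c2 = '/' then pvRunA .code rest
    else pvRunA .block (c2 :: rest)
termination_by _ l => l.length
decreasing_by all_goals (simp only [List.length_cons, List.length_nil]; omega)

def strip_cpp_comments (code : String) : String :=
  PySem.Str.strip (String.ofList (pvRunA .code (PySem.Str.strip code).toList))

-- ===== PORT B =====
-- hand port of the regex engine's behaviour for B's compiled pattern (no regex library in
-- Lean); each helper is one alternative of the alternation, tried left-to-right as re.sub does.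

-- after the opening quote q, '(?:\\.|[^q\\])*q?' : (matched chars, remainder)
def pvTokTail (q : Char) : List Char → List Char × List Char
  | [] => ([], [])
  | [c] =>
    if c = q then ([q], [])
    else if c = '\\' then ([], ['\\'])           -- '\\.' needs a char after it: left unmatched
    else ([c], [])
  | c :: c2 :: rest =>
    if c = q then ([q], c2 :: rest)
    else if c = '\\' then
      let p := pvTokTail q rest
      (c :: c2 :: p.1, p.2)
    else
      let p := pvTokTail q (c2 :: rest)
      (c :: p.1, p.2)

-- '[^\n]*' : remainder after the line comment (the newline is not consumed)
def pvSkipLine : List Char → List Char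
  | [] => []
  | c :: rest => if c = '\n' then c :: rest else pvSkipLine rest

-- '(?:.*?\*/|.*)' : remainder after the first '*/', or [] if there is none
def pvSkipBlock : List Char → List Char
  | [] => []
  | [_] => []
  | c :: c2 :: rest => if c = '*' ∧ c2 = '/' then rest else pvSkipBlock (c2 :: rest)

theorem pvTokTail_len (q : Char) : (l : List Char) → (pvTokTail q l).2.length ≤ l.length
  | [] => by simp [pvTokTail]
  | [c] => by
    simp only [pvTokTail]; split_ifs <;> simp
  | c :: c2 :: rest => by
    have ha := pvTokTail_len q rest
    have hb := pvTokTail_len q (c2 :: rest)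
    simp only [pvTokTail] at *; split_ifs <;> simp_all <;> omega

theorem pvSkipLine_len : (l : List Char) → (pvSkipLine l).length ≤ l.length
  | [] => by simp [pvSkipLine]
  | c :: rest => by
    have := pvSkipLine_len rest
    by_cases h : c = '\n' <;> simp [pvSkipLine, h]
    omega

theorem pvSkipBlock_len : (l : List Char) → (pvSkipBlock l).length ≤ l.length
  | [] => by simp [pvSkipBlock]
  | [c] => by simp [pvSkipBlock]
  | c :: c2 :: rest => by
    have := pvSkipBlock_len (c2 :: rest)
    simp only [pvSkipBlock] at *; split_ifs <;> simp_all <;> omega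

-- the re.sub scan: at each position try the alternatives in order (a quote starts a kept
-- literal token, '//' and '/*' start a dropped comment token), else copy one character.
def pvScanB : List Char → List Char
  | [] => []
  | [c] =>
    if c = '"' then
      let p := pvTokTail '"' []
      c :: (p.1 ++ pvScanB p.2)
    else if c = '\'' then
      let p := pvTokTail '\'' []
      c :: (p.1 ++ pvScanB p.2)
    else [c]                                      -- a lone '/' matches no alternative: copied
  | c :: c2 :: rest =>
    if c = '"' then
      let p := pvTokTail '"' (c2 :: rest)
      c :: (p.1 ++ pvScanB p.2)
    else if c = '\'' then
      let p := pvTokTail '\'' (c2 :: rest)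
      c :: (p.1 ++ pvScanB p.2)
    else if c = '/' ∧ c2 = '/' then pvScanB (pvSkipLine rest)
    else if c = '/' ∧ c2 = '*' then pvScanB (pvSkipBlock rest)
    else c :: pvScanB (c2 :: rest)
termination_by l => l.length
decreasing_by all_goals
  (simp only [List.length_cons, List.length_nil]
   first
     | (have h1 := pvTokTail_len '"' (c2 :: rest)
        have h2 := pvTokTail_len '\'' (c2 :: rest)
        have h3 := pvSkipLine_len rest
        have h4 := pvSkipBlock_len rest
        simp only [List.length_cons] at h1 h2
        omega)
     | simp [pvTokTail]
     | omega)

def strip_cpp_comments_alt (code : String) : String :=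
  PySem.Str.strip (String.ofList (pvScanB (PySem.Str.strip code).toList))

-- ===== PRECONDITION & SPEC =====
def Spec_strip_cpp_comments (code : String) (out : String) : Prop := out = strip_cpp_comments_alt code
instance (code : String) (out : String) : Decidable (Spec_strip_cpp_comments code out) := by unfold Spec_strip_cpp_comments; infer_instance

-- ===== CLAIM (what is proved, stated in full; the proofs are below) =====
def Claim_equal_strip_cpp_comments : Prop := ∀ (code : String), Dom_strip_cpp_comments code → Spec_strip_cpp_comments code (strip_cpp_comments code)

-- ===== LEMMAS AND PROOFS =====

-- joint invariant: A's five states correspond to B's regex alternatives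
theorem pvMain : ∀ fuel : Nat, ∀ l : List Char, l.length ≤ fuel →
    (pvRunA .code l = pvScanB l) ∧
    (pvRunA .str l = (pvTokTail '"' l).1 ++ pvScanB (pvTokTail '"' l).2) ∧
    (pvRunA .chr l = (pvTokTail '\'' l).1 ++ pvScanB (pvTokTail '\'' l).2) ∧
    (pvRunA .line l = pvScanB (pvSkipLine l)) ∧
    (pvRunA .block l = pvScanB (pvSkipBlock l)) := by
  intro fuel
  induction fuel with
  | zero =>
    intro l hl
    have : l = [] := List.length_eq_zero_iff.mp (Nat.le_zero.mp hl)
    subst this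
    simp [pvRunA, pvScanB, pvTokTail, pvSkipLine, pvSkipBlock]
  | succ f ih =>
    intro l hl
    match l with
    | [] => simp [pvRunA, pvScanB, pvTokTail, pvSkipLine, pvSkipBlock]
    | [c] =>
      refine ⟨?_, ?_, ?_, ?_, ?_⟩
      · by_cases h1 : c = '"' <;> by_cases h2 : c = '\'' <;>
          simp_all [pvRunA, pvScanB, pvTokTail]
      · by_cases h1 : c = '\\' <;> by_cases h2 : c = '"' <;>
          simp_all [pvRunA, pvScanB, pvTokTail]
      · by_cases h1 : c = '\\' <;> by_cases h2 : c = '\'' <;>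
          simp_all [pvRunA, pvScanB, pvTokTail]
      · by_cases h : c = '\n' <;> simp_all [pvRunA, pvScanB, pvSkipLine]
      · simp [pvRunA, pvScanB, pvSkipBlock]
    | c :: c2 :: rest =>
      have hr : rest.length ≤ f := by simp at hl; omega
      have hr2 : (c2 :: rest).length ≤ f := by simp at hl ⊢; omega
      have I1 := fun (l : List Char) h => (ih l h).1
      have I2 := fun (l : List Char) h => (ih l h).2.1
      have I3 := fun (l : List Char) h => (ih l h).2.2.1
      have I4 := fun (l : List Char) h => (ih l h).2.2.2.1
      have I5 := fun (l : List Char) h => (ih l h).2.2.2.2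
      refine ⟨?_, ?_, ?_, ?_, ?_⟩
      · by_cases h1 : c = '"'
        · simp [pvRunA, pvScanB, h1, I2 _ hr2]
        · by_cases h2 : c = '\''
          · simp [pvRunA, pvScanB, h1, h2, I3 _ hr2]
          · by_cases h3 : c = '/' ∧ c2 = '/'
            · simp [pvRunA, pvScanB, h1, h2, h3, I4 _ hr]
            · by_cases h4 : c = '/' ∧ c2 = '*'
              · simp [pvRunA, pvScanB, h1, h2, h3, h4, I5 _ hr]
              · simp [pvRunA, pvScanB, h1, h2, h3, h4, I1 _ hr2]
      · by_cases h1 : c = '\\'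
        · simp [pvRunA, pvTokTail, h1, I2 _ hr]
        · by_cases h2 : c = '"'
          · simp [pvRunA, pvTokTail, h1, h2, I1 _ hr2]
          · simp [pvRunA, pvTokTail, h1, h2, I2 _ hr2]
      · by_cases h1 : c = '\\'
        · simp [pvRunA, pvTokTail, h1, I3 _ hr]
        · by_cases h2 : c = '\''
          · simp [pvRunA, pvTokTail, h1, h2, I1 _ hr2]
          · simp [pvRunA, pvTokTail, h1, h2, I3 _ hr2]
      · by_cases h : c = '\n'
        · simp [pvRunA, pvSkipLine, pvScanB, h, I1 _ hr2]
        · simp [pvRunA, pvSkipLine, h, I4 _ hr2]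
      · by_cases h : c = '*' ∧ c2 = '/'
        · simp [pvRunA, pvSkipBlock, h, I1 _ hr]
        · simp [pvRunA, pvSkipBlock, h, I5 _ hr2]

-- ===== VERDICT (by name: the statement is the Claim_ definition above) =====
theorem strip_cpp_comments_spec : Claim_equal_strip_cpp_comments := by
  intro code _
  unfold Spec_strip_cpp_comments strip_cpp_comments strip_cpp_comments_alt
  rw [(pvMain _ _ (le_refl _)).1]
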